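-- pv_equiv track=rewrite | github.com/MerelVanEssen/adventOfCode | 2025/06.py | part2
-- ===== SOURCE A (Python) =====
-- def multiplyList(lst):
-- 	result = 1
-- 	for x in lst:
-- 		result = result * x
-- 	return result
--
-- def calculate(nrs, key):
-- 	if key == '+':
-- 		return sum(nrs)
-- 	elif key == '*':
-- 		return multiplyList(nrs)
-- 	return 0
--
-- def part2(lines):
-- 	total = 0
-- 	l = len(lines) - 1
-- 	nrs = []
-- 	k = ''
-- 	for j in range(max(len(line) for line in lines)):
-- 		nr = ''
-- 		ready = True
-- 		for i in range(l + 1):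
-- 			if j < len(lines[i]):
-- 				if lines[i][j].isdigit():
-- 					nr += lines[i][j]
-- 					ready = False
-- 				elif lines[i][j] == '*' or lines[i][j] == '+':
-- 					k = lines[i][j]
-- 		if nr != '':
-- 			nrs.append(nr)
-- 		if ready:
-- 			total += calculate([int(x) for x in nrs], k)
-- 			nrs = []
-- 			k = ''
-- 	if nrs:
-- 		total += calculate([int(x) for x in nrs], k)
-- 	return total
-- ===== SOURCE B (Python) =====
-- def _cols(lines):
--     # transpose the grid into per-column (digit string, operator list) pairs
--     width = max(len(line) for line in lines)
--     cols = []
--     for j in range(width):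
--         cells = [row[j] for row in lines if j < len(row)]
--         cols.append((''.join(c for c in cells if c.isdigit()),
--                      [c for c in cells if c == '+' or c == '*']))
--     return cols
--
-- def _evaluate(block):
--     # value of one block: its numbers combined under the block's last operator
--     nrs = [int(d) for d, _ in block if d]
--     ops = [o for _, os in block for o in os]
--     if not ops:
--         return 0
--     if ops[-1] == '+':
--         return sum(nrs)
--     p = 1
--     for v in nrs:
--         p *= v
--     return p
--
-- def _total(cols):
--     # slice off whole blocks: the first digit-free column closes the first block
--     total = 0
--     while cols:
--         sep = next((i for i, (d, _) in enumerate(cols) if not d), None)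
--         if sep is None:
--             return total + _evaluate(cols)
--         total += _evaluate(cols[:sep + 1])
--         cols = cols[sep + 1:]
--     return total
--
-- def part2(lines):
--     return _total(_cols(lines))
-- ===== Notes on version B (the rewrite author's own statement) =====
-- stated objective: alternative
-- what changed: B is a staged pipeline: it transposes the grid into per-column (digit-string, operator-list) pairs, then repeatedly slices off a whole block at the first digit-free column and evaluates each block independently (last operator of the sliced block, sum or product of its numbers), instead of A's single character-level sweep with running nr/ready/nrs/k state.
import Mathlib
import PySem

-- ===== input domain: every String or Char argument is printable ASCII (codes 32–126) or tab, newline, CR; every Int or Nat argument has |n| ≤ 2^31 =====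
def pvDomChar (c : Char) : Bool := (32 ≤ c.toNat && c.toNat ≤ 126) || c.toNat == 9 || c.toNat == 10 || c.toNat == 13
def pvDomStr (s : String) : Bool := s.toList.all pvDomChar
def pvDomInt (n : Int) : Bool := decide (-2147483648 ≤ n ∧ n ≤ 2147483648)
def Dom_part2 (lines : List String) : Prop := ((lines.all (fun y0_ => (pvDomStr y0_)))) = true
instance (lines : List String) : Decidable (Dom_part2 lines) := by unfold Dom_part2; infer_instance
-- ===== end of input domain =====

-- B replaces A's char-level column state machine by a staged pipeline: transpose into per-column
-- (digits, operators) data, then repeatedly slice off a whole block at the first digit-free column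
-- and evaluate it independently; return values agree on every non-empty line list (both raise on []).

-- ===== PORT A =====
def multiplyList (lst : List Int) : Int :=
  lst.foldl (fun result x => result * x) 1

def calculate (nrs : List Int) (key : List Char) : Int :=
  if key = ['+'] then nrs.sum
  else if key = ['*'] then multiplyList nrs
  else 0

-- body of A's inner 'for i in range(l + 1)' loop; state = (nr, ready, k)
def innerStep (j : Int) (t : List Char × Bool × List Char) (line : String) :
    List Char × Bool × List Char :=
  if j < PySem.Str.len line then
    let c := (PySem.Str.pyGet? line j).getD ' '
    if PySem.Chars.isdigit c then (t.1 ++ [c], false, t.2.2)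
    else if c = '*' ∨ c = '+' then (t.1, t.2.1, [c])
    else t
  else t

def part2 (lines : List String) : Int :=
  let l : Int := (lines.length : Int) - 1
  let width : Int := (PySem.List.max? (lines.map (fun line => PySem.Str.len line)) (fun y => y)).getD 0
  let res :=
    (PySem.List.pyRange 0 width).foldl
      (fun (s : Int × List (List Char) × List Char) j =>
        let inner :=
          (PySem.List.pyRange 0 (l + 1)).foldl
            (fun t i => innerStep j t (PySem.List.pyGetD lines i ""))
            ([], true, s.2.2)
        let nrs' := if inner.1 ≠ [] then s.2.1 ++ [inner.1] else s.2.1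
        if inner.2.1 then
          (s.1 + calculate (nrs'.map (fun x => (PySem.Int.ofChars? x).getD 0)) inner.2.2, [], [])
        else (s.1, nrs', inner.2.2))
      (0, [], [])
  if res.2.1 ≠ [] then
    res.1 + calculate (res.2.1.map (fun x => (PySem.Int.ofChars? x).getD 0)) res.2.2
  else res.1

-- ===== PORT B =====
-- cells of column j: [row[j] for row in lines if j < len(row)]
def colCells (lines : List String) (j : Int) : List Char :=
  (lines.filter (fun line => decide (j < PySem.Str.len line))).map
    (fun line => (PySem.Str.pyGet? line j).getD ' ')

-- one entry of B's _cols: (digit string of the column, its operator characters)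
def colData (lines : List String) (j : Int) : List Char × List Char :=
  let cells := colCells lines j
  (cells.filter (fun c => PySem.Chars.isdigit c),
   cells.filter (fun c => decide (c = '+' ∨ c = '*')))

-- B's _evaluate: value of one block
def evaluateB (block : List (List Char × List Char)) : Int :=
  let nrs := (block.filter (fun p => p.1 ≠ [])).map (fun p => (PySem.Int.ofChars? p.1).getD 0)
  let ops := block.flatMap (fun p => p.2)
  if ops = [] then 0
  else if ops.getLast?.getD ' ' = '+' then nrs.sum
  else nrs.foldl (fun p v => p * v) 1

-- B's _total loop: slice off a whole block at the first digit-free column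
-- (Python's 'next(..., None)' is ported as findIdx, which returns cols.length when no match)
def totalB (total : Int) (cols : List (List Char × List Char)) : Int :=
  if cols = [] then total
  else
    if h : cols.findIdx (fun c => decide (c.1 = [])) < cols.length then
      totalB (total + evaluateB (cols.take (cols.findIdx (fun c => decide (c.1 = [])) + 1)))
        (cols.drop (cols.findIdx (fun c => decide (c.1 = [])) + 1))
    else total + evaluateB cols
termination_by cols.length
decreasing_by simp only [List.length_drop]; omega

def part2_alt (lines : List String) : Int :=
  let width : Int := (PySem.List.max? (lines.map (fun line => PySem.Str.len line)) (fun y => y)).getD 0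
  totalB 0 ((PySem.List.pyRange 0 width).map (colData lines))

-- ===== PRECONDITION & SPEC =====
-- A evaluates max(len(line) for line in lines), which raises ValueError on an empty list (so does B).
def Pre_part2 (lines : List String) : Prop := lines ≠ []
instance (lines : List String) : Decidable (Pre_part2 lines) := by unfold Pre_part2; infer_instance
def pvWitness_part2 : List String := ["12 34", "+  * "]

def Spec_part2 (lines : List String) (out : Int) : Prop := out = part2_alt lines
instance (lines : List String) (out : Int) : Decidable (Spec_part2 lines out) := by unfold Spec_part2; infer_instance

-- ===== CLAIM (what is proved, stated in full; the proofs are below) =====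
def Claim_equal_part2 : Prop := ∀ (lines : List String), Dom_part2 lines → Pre_part2 lines → Spec_part2 lines (part2 lines)

-- ===== LEMMAS AND PROOFS =====

lemma elim_getLast?_cons {α β : Type} (c : α) (l : List α) (k : β) (f : α → β) :
    (c :: l).getLast?.elim k f = l.getLast?.elim (f c) f := by
  cases l with
  | nil => simp
  | cons b t =>
    rw [List.getLast?_cons_cons]
    cases h : (b :: t).getLast? with
    | none => simp at h
    | some x => simp

lemma elim_getLast?_append {α β : Type} (l1 l2 : List α) (k : β) (f : α → β) :
    (l1 ++ l2).getLast?.elim k f = l2.getLast?.elim (l1.getLast?.elim k f) f := by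
  induction l1 generalizing k with
  | nil => simp
  | cons a t ih => rw [List.cons_append, elim_getLast?_cons, ih, elim_getLast?_cons]

lemma colCells_cons (line : String) (rest : List String) (j : Int) :
    colCells (line :: rest) j =
      if j < PySem.Str.len line then
        ((PySem.Str.pyGet? line j).getD ' ') :: colCells rest j
      else colCells rest j := by
  simp only [colCells, List.filter_cons]
  by_cases hj : j < PySem.Str.len line
  · rw [if_pos (decide_eq_true hj), if_pos hj, List.map_cons]
  · rw [if_neg (by simpa using hj), if_neg hj]

-- A's inner column scan computes exactly B's per-column data
lemma inner_eq (j : Int) (ls : List String) (nr : List Char) (ready : Bool) (k : List Char) :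
    ls.foldl (innerStep j) (nr, ready, k) =
      (nr ++ (colCells ls j).filter (fun c => PySem.Chars.isdigit c),
       ready && ((colCells ls j).filter (fun c => PySem.Chars.isdigit c)).isEmpty,
       ((colCells ls j).filter (fun c => decide (c = '+' ∨ c = '*'))).getLast?.elim k
         (fun c => [c])) := by
  induction ls generalizing nr ready k with
  | nil => simp [colCells]
  | cons line rest ih =>
    rw [List.foldl_cons, colCells_cons]
    by_cases hj : j < PySem.Str.len line
    · rw [if_pos hj]
      set c := (PySem.Str.pyGet? line j).getD ' ' with hc
      have hstep : innerStep j (nr, ready, k) line =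
          (if PySem.Chars.isdigit c then (nr ++ [c], false, k)
           else if c = '*' ∨ c = '+' then (nr, ready, [c]) else (nr, ready, k)) := by
        simp only [innerStep, if_pos hj, ← hc]
      by_cases hd : PySem.Chars.isdigit c
      · have h1 : ¬ (c = '+' ∨ c = '*') := by
          rintro (h | h) <;> rw [h] at hd <;> exact absurd hd (by decide)
        rw [hstep, if_pos hd, ih]
        simp [hd, h1]
      · by_cases hop : c = '*' ∨ c = '+'
        · have h2 : c = '+' ∨ c = '*' := hop.symm
          rw [hstep, if_neg hd, if_pos hop, ih]
          simp [hd, h2, elim_getLast?_cons]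
        · have h2 : ¬ (c = '+' ∨ c = '*') := fun h => hop h.symm
          rw [hstep, if_neg hd, if_neg hop, ih]
          simp [hd, h2]
    · rw [if_neg hj]
      have hstep : innerStep j (nr, ready, k) line = (nr, ready, k) := by
        simp only [innerStep, if_neg hj]
      rw [hstep, ih]

-- A's outer loop body, abstracted over a column's (digits, operators) pair
def stepA (s : Int × List (List Char) × List Char) (col : List Char × List Char) :
    Int × List (List Char) × List Char :=
  let k' := col.2.getLast?.elim s.2.2 (fun c => [c])
  if col.1 = [] then
    (s.1 + calculate (s.2.1.map (fun x => (PySem.Int.ofChars? x).getD 0)) k', [], [])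
  else (s.1, s.2.1 ++ [col.1], k')

def finish (s : Int × List (List Char) × List Char) : Int :=
  if s.2.1 ≠ [] then
    s.1 + calculate (s.2.1.map (fun x => (PySem.Int.ofChars? x).getD 0)) s.2.2
  else s.1

-- A's outer fold step equals stepA on the column data
lemma step_eq (lines : List String) (s : Int × List (List Char) × List Char) (j : Int) :
    (let inner :=
        (PySem.List.pyRange 0 ((lines.length : Int) - 1 + 1)).foldl
          (fun t i => innerStep j t (PySem.List.pyGetD lines i ""))
          ([], true, s.2.2)
      let nrs' := if inner.1 ≠ [] then s.2.1 ++ [inner.1] else s.2.1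
      if inner.2.1 then
        (s.1 + calculate (nrs'.map (fun x => (PySem.Int.ofChars? x).getD 0)) inner.2.2,
          ([] : List (List Char)), ([] : List Char))
      else (s.1, nrs', inner.2.2)) = stepA s (colData lines j) := by
  have hb : (lines.length : Int) - 1 + 1 = (lines.length : Int) := by ring
  rw [hb, PySem.List.foldl_pyRange_zero_pyGetD' lines "" (innerStep j) ([], true, s.2.2),
    inner_eq]
  set D := (colCells lines j).filter (fun c => PySem.Chars.isdigit c) with hD
  set O := (colCells lines j).filter (fun c => decide (c = '+' ∨ c = '*')) with hO
  have hcol : colData lines j = (D, O) := by simp [colData, hD, hO]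
  rw [hcol]
  cases D with
  | nil => simp [stepA]
  | cons d ds => simp [stepA]

-- helper mirroring B's per-block number extraction
def digitsOf (block : List (List Char × List Char)) : List (List Char) :=
  (block.filter (fun p => p.1 ≠ [])).map (fun p => p.1)

-- proof-side recursion equivalent to finishing A's fold
def F (nrs : List (List Char)) (k : List Char) : List (List Char × List Char) → Int
  | [] => if nrs ≠ [] then calculate (nrs.map (fun x => (PySem.Int.ofChars? x).getD 0)) k else 0
  | c :: rest =>
      let k' := c.2.getLast?.elim k (fun ch => [ch])
      if c.1 = [] then
        calculate (nrs.map (fun x => (PySem.Int.ofChars? x).getD 0)) k' + F [] [] rest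
      else F (nrs ++ [c.1]) k' rest

lemma finish_fold (cols : List (List Char × List Char)) :
    ∀ (total : Int) (nrs : List (List Char)) (k : List Char),
      finish (cols.foldl stepA (total, nrs, k)) = total + F nrs k cols := by
  induction cols with
  | nil =>
    intro total nrs k
    by_cases h : nrs = [] <;> simp [finish, F, h]
  | cons c rest ih =>
    intro total nrs k
    rw [List.foldl_cons]
    by_cases h : c.1 = []
    · have : stepA (total, nrs, k) c =
        (total + calculate (nrs.map (fun x => (PySem.Int.ofChars? x).getD 0))
          (c.2.getLast?.elim k (fun ch => [ch])), [], []) := by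
        simp [stepA, h]
      rw [this, ih]
      simp [F, h]; ring
    · have : stepA (total, nrs, k) c =
        (total, nrs ++ [c.1], c.2.getLast?.elim k (fun ch => [ch])) := by
        simp [stepA, h]
      rw [this, ih]
      simp [F, h]

lemma getLast?_ne_none {α : Type} (a : α) (t : List α) : (a :: t).getLast? ≠ none := by
  induction t generalizing a with
  | nil => simp
  | cons b u ih => rw [List.getLast?_cons_cons]; exact ih b

-- all operator entries of cols produced by colData are '+' or '*'
def opsValid (cols : List (List Char × List Char)) : Prop :=
  ∀ c ∈ cols, ∀ ch ∈ c.2, ch = '+' ∨ ch = '*'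

lemma evaluateB_eq (block : List (List Char × List Char)) (hv : opsValid block) :
    evaluateB block =
      calculate ((digitsOf block).map (fun x => (PySem.Int.ofChars? x).getD 0))
        ((block.flatMap (fun p => p.2)).getLast?.elim [] (fun c => [c])) := by
  unfold evaluateB calculate digitsOf multiplyList
  set ops := block.flatMap (fun p => p.2) with hops
  cases hlast : ops.getLast? with
  | none =>
    have : ops = [] := by
      cases hops' : ops with
      | nil => rfl
      | cons a t => rw [hops'] at hlast; exact absurd hlast (getLast?_ne_none a t)
    simp [this]
  | some c =>
    have hne : ops ≠ [] := by
      intro h; rw [h] at hlast; simp at hlast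
    have hc : c = '+' ∨ c = '*' := by
      have hmem : c ∈ ops := List.mem_of_getLast? hlast
      rw [hops, List.mem_flatMap] at hmem
      obtain ⟨p, hp, hcp⟩ := hmem
      exact hv p hp c hcp
    rw [if_neg hne, hlast]
    rcases hc with rfl | rfl
    · simp [Function.comp_def]
    · simp [Function.comp_def]

lemma totalB_unfold (t : Int) (cols : List (List Char × List Char)) (h : cols ≠ []) :
    totalB t cols =
      if cols.findIdx (fun c => decide (c.1 = [])) < cols.length then
        totalB (t + evaluateB (cols.take (cols.findIdx (fun c => decide (c.1 = [])) + 1)))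
          (cols.drop (cols.findIdx (fun c => decide (c.1 = [])) + 1))
      else t + evaluateB cols := by
  rw [totalB, if_neg h, dite_eq_ite]

lemma totalB_acc : ∀ (n : Nat) (cols : List (List Char × List Char)), cols.length ≤ n →
    ∀ t : Int, totalB t cols = t + totalB 0 cols := by
  intro n
  induction n with
  | zero =>
    intro cols hlen t
    have : cols = [] := List.eq_nil_of_length_eq_zero (Nat.le_zero.mp hlen)
    subst this
    simp [totalB]
  | succ m ih =>
    intro cols hlen t
    by_cases h : cols = []
    · subst h; simp [totalB]
    · rw [totalB_unfold t cols h, totalB_unfold 0 cols h]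
      by_cases hi : cols.findIdx (fun c => decide (c.1 = [])) < cols.length
      · rw [if_pos hi, if_pos hi]
        have hld : (cols.drop (cols.findIdx (fun c => decide (c.1 = [])) + 1)).length ≤ m := by
          simp only [List.length_drop]
          have : 0 < cols.length := List.length_pos_of_ne_nil h
          omega
        rw [ih _ hld, ih _ hld (0 + evaluateB _)]
        ring
      · rw [if_neg hi, if_neg hi]
        ring

-- main correspondence: F with an in-progress block prefix, against B's block slicing
lemma F_spec : ∀ (cols : List (List Char × List Char)), opsValid cols →
    ∀ (nrs : List (List Char)) (k : List Char),
    F nrs k cols =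
      if cols.findIdx (fun c => decide (c.1 = [])) < cols.length then
        calculate ((nrs ++ digitsOf (cols.take (cols.findIdx (fun c => decide (c.1 = [])) + 1))).map
            (fun x => (PySem.Int.ofChars? x).getD 0))
          (((cols.take (cols.findIdx (fun c => decide (c.1 = [])) + 1)).flatMap
              (fun p => p.2)).getLast?.elim k (fun c => [c]))
          + F [] [] (cols.drop (cols.findIdx (fun c => decide (c.1 = [])) + 1))
      else if nrs ++ digitsOf cols ≠ [] then
        calculate ((nrs ++ digitsOf cols).map (fun x => (PySem.Int.ofChars? x).getD 0))
          ((cols.flatMap (fun p => p.2)).getLast?.elim k (fun c => [c]))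
      else 0 := by
  intro cols
  induction cols with
  | nil =>
    intro _ nrs k
    simp [F, digitsOf]
  | cons c rest ih =>
    intro hv nrs k
    have hvr : opsValid rest := fun p hp => hv p (List.mem_cons_of_mem _ hp)
    by_cases hcp : c.1 = []
    · have hfi : (c :: rest).findIdx (fun c => decide (c.1 = [])) = 0 := by
        simp [List.findIdx_cons, hcp]
      rw [hfi]
      simp only [F, if_pos hcp, List.length_cons, zero_add, List.take_succ_cons,
        List.take_zero, List.drop_succ_cons, List.drop_zero]
      rw [if_pos (Nat.succ_pos _)]
      have hdig : digitsOf [c] = [] := by simp [digitsOf, hcp]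
      have hflat : ([c] : List (List Char × List Char)).flatMap (fun p => p.2) = c.2 := by simp
      rw [hdig, hflat, List.append_nil]
    · have hfi : (c :: rest).findIdx (fun c => decide (c.1 = []))
          = rest.findIdx (fun c => decide (c.1 = [])) + 1 := by
        simp [List.findIdx_cons, hcp]
      rw [hfi]
      simp only [F, if_neg hcp]
      rw [ih hvr (nrs ++ [c.1]) (c.2.getLast?.elim k (fun ch => [ch]))]
      simp only [List.length_cons, Nat.add_lt_add_iff_right, List.take_succ_cons,
        List.drop_succ_cons]
      by_cases hr : rest.findIdx (fun c => decide (c.1 = [])) < rest.length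
      · rw [if_pos hr, if_pos hr]
        have hdig : digitsOf (c :: rest.take (rest.findIdx (fun c => decide (c.1 = [])) + 1))
            = c.1 :: digitsOf (rest.take (rest.findIdx (fun c => decide (c.1 = [])) + 1)) := by
          simp [digitsOf, hcp]
        have hflat : (c :: rest.take (rest.findIdx (fun c => decide (c.1 = [])) + 1)).flatMap
              (fun p => p.2)
            = c.2 ++ (rest.take (rest.findIdx (fun c => decide (c.1 = [])) + 1)).flatMap
              (fun p => p.2) := by simp
        rw [hdig, hflat, elim_getLast?_append]
        simp
      · rw [if_neg hr, if_neg hr]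
        have hdig : digitsOf (c :: rest) = c.1 :: digitsOf rest := by simp [digitsOf, hcp]
        have hflat : (c :: rest).flatMap (fun p => p.2) = c.2 ++ rest.flatMap (fun p => p.2) := by
          simp
        rw [hdig, hflat, elim_getLast?_append]
        have h1 : nrs ++ [c.1] ++ digitsOf rest = nrs ++ (c.1 :: digitsOf rest) := by simp
        rw [h1]

-- if no column is digit-free, the first column contributes a number
lemma digitsOf_ne_nil (cols : List (List Char × List Char))
    (hi : ¬ cols.findIdx (fun c => decide (c.1 = [])) < cols.length) (hne : cols ≠ []) :
    digitsOf cols ≠ [] := by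
  cases cols with
  | nil => exact absurd rfl hne
  | cons c rest =>
    by_cases h : c.1 = []
    · exfalso
      apply hi
      have : (c :: rest).findIdx (fun c => decide (c.1 = [])) = 0 := by
        simp [List.findIdx_cons, h]
      rw [this]
      simp
    · simp [digitsOf, h]

lemma F_eq_totalB : ∀ (n : Nat) (cols : List (List Char × List Char)), cols.length ≤ n →
    opsValid cols → F [] [] cols = totalB 0 cols := by
  intro n
  induction n with
  | zero =>
    intro cols hlen _
    have : cols = [] := List.eq_nil_of_length_eq_zero (Nat.le_zero.mp hlen)
    subst this
    simp [F, totalB]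
  | succ m ih =>
    intro cols hlen hv
    by_cases hne : cols = []
    · subst hne; simp [F, totalB]
    · rw [F_spec cols hv [] [], totalB_unfold 0 cols hne]
      by_cases hi : cols.findIdx (fun c => decide (c.1 = [])) < cols.length
      · rw [if_pos hi, if_pos hi]
        have hvt : opsValid (cols.take (cols.findIdx (fun c => decide (c.1 = [])) + 1)) :=
          fun p hp => hv p (List.mem_of_mem_take hp)
        have hvd : opsValid (cols.drop (cols.findIdx (fun c => decide (c.1 = [])) + 1)) :=
          fun p hp => hv p (List.mem_of_mem_drop hp)
        have hld : (cols.drop (cols.findIdx (fun c => decide (c.1 = [])) + 1)).length ≤ m := by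
          simp only [List.length_drop]
          have : 0 < cols.length := List.length_pos_of_ne_nil hne
          omega
        rw [totalB_acc m _ hld (0 + evaluateB _), evaluateB_eq _ hvt, ih _ hld hvd]
        simp
      · rw [if_neg hi, if_neg hi]
        have hd := digitsOf_ne_nil cols hi hne
        rw [evaluateB_eq _ hv]
        simp [hd]

lemma colData_valid (lines : List String) (w : Int) :
    opsValid ((PySem.List.pyRange 0 w).map (colData lines)) := by
  intro c hc ch hch
  rw [List.mem_map] at hc
  obtain ⟨j, _, rfl⟩ := hc
  simp only [colData] at hch
  have := List.of_mem_filter hch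
  simpa using this

-- ===== VERDICT (by name: the statement is the Claim_ definition above) =====
theorem part2_spec : Claim_equal_part2 := by
  intro lines _ _
  unfold Spec_part2
  simp only [part2, part2_alt]
  set w : Int := (PySem.List.max? (lines.map (fun line => PySem.Str.len line)) (fun y => y)).getD 0 with hw
  have hsteps :
      (PySem.List.pyRange 0 w).foldl
        (fun (s : Int × List (List Char) × List Char) j =>
          let inner :=
            (PySem.List.pyRange 0 ((lines.length : Int) - 1 + 1)).foldl
              (fun t i => innerStep j t (PySem.List.pyGetD lines i ""))
              ([], true, s.2.2)
          let nrs' := if inner.1 ≠ [] then s.2.1 ++ [inner.1] else s.2.1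
          if inner.2.1 then
            (s.1 + calculate (nrs'.map (fun x => (PySem.Int.ofChars? x).getD 0)) inner.2.2, [], [])
          else (s.1, nrs', inner.2.2))
        ((0 : Int), ([] : List (List Char)), ([] : List Char))
      = ((PySem.List.pyRange 0 w).map (colData lines)).foldl stepA (0, [], []) := by
    rw [List.foldl_map]
    exact PySem.List.foldl_congr_mem _ _ _ _ (fun s j _ => step_eq lines s j)
  show finish _ = _
  rw [hsteps, finish_fold, F_eq_totalB ((PySem.List.pyRange 0 w).map (colData lines)).length _
    le_rfl (colData_valid lines w)]
  simp
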